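-- pv_equiv track=rewrite | github.com/LEEILHO/Coding_Test | swea/swea15612.py | check
-- ===== SOURCE A (Python) =====
-- def check(board):
--     cnt =0
--     rook_x =[]
--     rook_y =[]
--     for i in range(len(board)):
--         for j in range(len(board[0])):
--             if board[i][j] =="O":
--                 if i in rook_x or j in rook_y:
--                     return "no"
--                 else:
--                     rook_x.append(i)
--                     rook_y.append(j)
--                     cnt+=1
--     if cnt ==8:
--         return "yes"
--     else:
--         return "no"
-- ===== SOURCE B (Python) =====
-- def check(board):
--     cols = len(board[0]) if board else 0
--     row_counts = [row[:cols].count("O") for row in board]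
--     col_counts = [sum(row[j] == "O" for row in board) for j in range(cols)]
--     if sum(row_counts) == 8 and all(c <= 1 for c in row_counts) and all(c <= 1 for c in col_counts):
--         return "yes"
--     return "no"
-- ===== Notes on version B (the rewrite author's own statement) =====
-- stated objective: alternative
-- what changed: Replaces A's stateful duplicate-detection scan (seen-row/seen-column lists with membership tests and early return) by a histogram criterion: compute the rook count of every row (by slicing and counting each row) and of every column (a column-major sum pass), then answer yes iff the total is 8 and every row and column count is at most 1 — no positions, no seen-lists, no early exit.
-- outside the precondition, e.g. on check([['O', 'O'], ['X']]): A returns 'no', B raises IndexError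
import Mathlib
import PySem

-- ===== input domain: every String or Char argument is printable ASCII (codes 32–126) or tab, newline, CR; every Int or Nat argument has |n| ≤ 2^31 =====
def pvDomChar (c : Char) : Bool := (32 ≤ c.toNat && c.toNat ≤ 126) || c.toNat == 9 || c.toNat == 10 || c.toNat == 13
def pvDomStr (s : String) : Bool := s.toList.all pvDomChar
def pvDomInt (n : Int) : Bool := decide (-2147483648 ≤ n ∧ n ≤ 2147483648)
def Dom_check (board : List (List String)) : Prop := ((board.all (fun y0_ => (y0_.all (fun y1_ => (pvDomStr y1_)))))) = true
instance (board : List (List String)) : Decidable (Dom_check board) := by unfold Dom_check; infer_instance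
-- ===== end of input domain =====

-- B replaces A's stateful duplicate-detection scan by a histogram criterion (per-row and
-- per-column rook counts, all ≤ 1 and summing to 8); objective: alternative decomposition.

-- ===== PORT A =====
-- total cell accessor; Pre_check guarantees the index is in range wherever it is used
def pvCell (row : List String) (j : Int) : String := (PySem.List.pyGet? row j).getD ""

-- the inner 'for j' loop: returns (some "no", _) on early return, else (none, final cnt/rook_x/rook_y)
def checkInner (row : List String) (i : Int) : List Int → Int → List Int → List Int →
    Option String × Int × List Int × List Int
  | [], cnt, rx, ry => (none, cnt, rx, ry)
  | j :: js, cnt, rx, ry =>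
    if pvCell row j = "O" then
      if rx.contains i || ry.contains j then (some "no", cnt, rx, ry)
      else checkInner row i js (cnt + 1) (rx ++ [i]) (ry ++ [j])
    else checkInner row i js cnt rx ry

-- the outer 'for i' loop
def checkOuter (board : List (List String)) (n : Int) : List Int → Int → List Int → List Int → String
  | [], cnt, _, _ => if cnt = 8 then "yes" else "no"
  | i :: is, cnt, rx, ry =>
    match checkInner ((PySem.List.pyGet? board i).getD []) i (PySem.List.pyRange 0 n 1) cnt rx ry with
    | (some s, _, _, _) => s
    | (none, cnt', rx', ry') => checkOuter board n is cnt' rx' ry'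

def check (board : List (List String)) : String :=
  checkOuter board ((board.headD []).length : Int) (PySem.List.pyRange 0 (board.length : Int) 1) 0 [] []

-- ===== PORT B =====
-- Source B: cols = len(board[0]) if board else 0; row_counts by slicing-and-counting each row;
-- col_counts by a column-major indicator-sum pass; yes iff sum == 8 and all counts ≤ 1.
def check_alt (board : List (List String)) : String :=
  let cols : Int := if board = [] then 0 else (((PySem.List.pyGet? board 0).getD []).length : Int)
  let rowCounts : List Int :=
    board.map (fun row => (PySem.List.count (PySem.List.slice row none (some cols)) "O" : Int))
  let colCounts : List Int :=
    (PySem.List.pyRange 0 cols 1).map (fun j =>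
      (board.map (fun row => if pvCell row j = "O" then (1 : Int) else 0)).sum)
  if rowCounts.sum = 8 ∧ (∀ c ∈ rowCounts, c ≤ 1) ∧ (∀ c ∈ colCounts, c ≤ 1) then "yes" else "no"

-- ===== PRECONDITION & SPEC =====
-- Pre_ excludes ragged boards with a row shorter than row 0: there A may raise IndexError
-- (and sometimes still returns "no" via an early return before reaching the short row,
-- while B, which always scans the whole board, raises IndexError).
def Pre_check (board : List (List String)) : Prop :=
  ∀ row ∈ board, (board.headD []).length ≤ row.length
instance (board : List (List String)) : Decidable (Pre_check board) := by unfold Pre_check; infer_instance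

def pvWitness_check : List (List String) := [["O", "X"], ["X", "O"]]

def Spec_check (board : List (List String)) (out : String) : Prop := out = check_alt board
instance (board : List (List String)) (out : String) : Decidable (Spec_check board out) := by unfold Spec_check; infer_instance

-- ===== CLAIM (what is proved, stated in full; the proofs are below) =====
def Claim_equal_check : Prop := ∀ (board : List (List String)), Dom_check board → Pre_check board → Spec_check board (check board)

-- ===== LEMMAS AND PROOFS =====

-- A's loop, flattened over the list of rook positions
def pvProcess : List (Int × Int) → Int → List Int → List Int → String
  | [], cnt, _, _ => if cnt = 8 then "yes" else "no"
  | (i, j) :: rest, cnt, rx, ry =>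
    if rx.contains i || ry.contains j then "no"
    else pvProcess rest (cnt + 1) (rx ++ [i]) (ry ++ [j])

-- the rook positions contributed by row i (as A enumerates them)
def pvRowRooks (row : List String) (i : Int) (js : List Int) : List (Int × Int) :=
  js.filterMap (fun j => if pvCell row j = "O" then some (i, j) else none)

-- rook count of a row / rook columns of a row
def pvK (js : List Int) (row : List String) : Nat :=
  (js.filter (fun j => pvCell row j == "O")).length
def pvCols (js : List Int) (row : List String) : List Int :=
  js.filter (fun j => pvCell row j == "O")

-- all rook positions, enumerated structurally with a running row index
def pvEnum (js : List Int) : List (List String) → Int → List (Int × Int)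
  | [], _ => []
  | r :: rs, i0 => pvRowRooks r i0 js ++ pvEnum js rs (i0 + 1)

theorem pvRowRooks_cons (row : List String) (i j : Int) (js : List Int) :
    pvRowRooks row i (j :: js) =
      (if pvCell row j = "O" then [(i, j)] else []) ++ pvRowRooks row i js := by
  simp only [pvRowRooks, List.filterMap_cons]
  split <;> simp_all

theorem checkInner_process (row : List String) (i : Int) :
    ∀ (js : List Int) (cnt : Int) (rx ry : List Int) (rest : List (Int × Int)),
    pvProcess (pvRowRooks row i js ++ rest) cnt rx ry =
      match checkInner row i js cnt rx ry with
      | (some s, _, _, _) => s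
      | (none, c, x, y) => pvProcess rest c x y := by
  intro js
  induction js with
  | nil => intro cnt rx ry rest; simp [pvRowRooks, checkInner]
  | cons j js ih =>
    intro cnt rx ry rest
    rw [pvRowRooks_cons]
    by_cases hc : pvCell row j = "O"
    · rw [if_pos hc]
      by_cases hb : i ∈ rx ∨ j ∈ ry
      · simp [checkInner, pvProcess, hc, hb]
      · simp only [List.cons_append, List.nil_append]
        rw [show pvProcess ((i, j) :: (pvRowRooks row i js ++ rest)) cnt rx ry =
            pvProcess (pvRowRooks row i js ++ rest) (cnt + 1) (rx ++ [i]) (ry ++ [j]) from by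
          simp [pvProcess, hb]]
        rw [ih]
        rw [show checkInner row i (j :: js) cnt rx ry =
            checkInner row i js (cnt + 1) (rx ++ [i]) (ry ++ [j]) from by
          simp [checkInner, hc, hb]]
    · rw [if_neg hc, List.nil_append, ih]
      rw [show checkInner row i (j :: js) cnt rx ry = checkInner row i js cnt rx ry from by
        simp [checkInner, hc]]

theorem checkOuter_process (board : List (List String)) (n : Int) :
    ∀ (is : List Int) (cnt : Int) (rx ry : List Int),
    checkOuter board n is cnt rx ry =
      pvProcess (is.flatMap (fun i =>
        pvRowRooks ((PySem.List.pyGet? board i).getD []) i (PySem.List.pyRange 0 n 1))) cnt rx ry := by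
  intro is
  induction is with
  | nil => intro cnt rx ry; simp [checkOuter, pvProcess]
  | cons i is ih =>
    intro cnt rx ry
    rw [List.flatMap_cons, checkInner_process]
    cases h : checkInner ((PySem.List.pyGet? board i).getD []) i (PySem.List.pyRange 0 n 1) cnt rx ry with
    | mk o st =>
      cases o with
      | some s => simp [checkOuter, h]
      | none => simp [checkOuter, h, ih]

theorem pvProcess_char :
    ∀ (ps : List (Int × Int)) (cnt : Int) (rx ry : List Int), rx.Nodup → ry.Nodup →
    pvProcess ps cnt rx ry =
      if (rx ++ ps.map Prod.fst).Nodup ∧ (ry ++ ps.map Prod.snd).Nodup then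
        (if cnt + (ps.length : Int) = 8 then "yes" else "no") else "no" := by
  intro ps
  induction ps with
  | nil => intro cnt rx ry hx hy; simp [pvProcess, hx, hy]
  | cons p rest ih =>
    obtain ⟨i, j⟩ := p
    intro cnt rx ry hx hy
    by_cases hb : i ∈ rx ∨ j ∈ ry
    · rw [show pvProcess ((i, j) :: rest) cnt rx ry = "no" from by simp [pvProcess, hb]]
      rcases hb with h | h
      · rw [if_neg]
        rintro ⟨hn, -⟩
        rw [List.map_cons, List.nodup_append] at hn
        exact hn.2.2 i h (i, j).1 (by simp) rfl
      · rw [if_neg]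
        rintro ⟨-, hn⟩
        rw [List.map_cons, List.nodup_append] at hn
        exact hn.2.2 j h (i, j).2 (by simp) rfl
    · have hir : i ∉ rx := fun h => hb (Or.inl h)
      have hjr : j ∉ ry := fun h => hb (Or.inr h)
      have hx' : (rx ++ [i]).Nodup := by
        rw [List.nodup_append]
        exact ⟨hx, List.nodup_singleton i, fun a ha b hbm => by
          simp at hbm; subst hbm; exact fun hai => hir (hai ▸ ha)⟩
      have hy' : (ry ++ [j]).Nodup := by
        rw [List.nodup_append]
        exact ⟨hy, List.nodup_singleton j, fun a ha b hbm => by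
          simp at hbm; subst hbm; exact fun haj => hjr (haj ▸ ha)⟩
      rw [show pvProcess ((i, j) :: rest) cnt rx ry =
          pvProcess rest (cnt + 1) (rx ++ [i]) (ry ++ [j]) from by simp [pvProcess, hb]]
      rw [ih (cnt + 1) (rx ++ [i]) (ry ++ [j]) hx' hy']
      have e1 : (rx ++ [i]) ++ rest.map Prod.fst = rx ++ ((i, j) :: rest).map Prod.fst := by simp
      have e2 : (ry ++ [j]) ++ rest.map Prod.snd = ry ++ ((i, j) :: rest).map Prod.snd := by simp
      have e3 : cnt + 1 + (rest.length : Int) = cnt + (((i, j) :: rest).length : Int) := by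
        simp; ring
      rw [e1, e2, e3]

-- A's flatMap over pyRange indices is the structural enumeration pvEnum
theorem pvEnum_eq (js : List Int) :
    ∀ (rest pre : List (List String)),
    (PySem.List.pyRange (pre.length : Int) ((pre.length : Int) + (rest.length : Int)) 1).flatMap
        (fun i => pvRowRooks ((PySem.List.pyGet? (pre ++ rest) i).getD []) i js) =
      pvEnum js rest (pre.length : Int) := by
  intro rest
  induction rest with
  | nil => intro pre; simp [PySem.List.pyRange_one_eq_nil, pvEnum]
  | cons r rs ih =>
    intro pre
    rw [PySem.List.pyRange_one_cons (by simp only [List.length_cons]; push_cast; omega)]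
    rw [List.flatMap_cons]
    rw [PySem.List.pyGet?_append_length]
    have h1 : ((pre.length : Int) + 1) = (((pre ++ [r]).length : Int)) := by simp
    have h2 : ((pre.length : Int) + ((r :: rs).length : Int)) =
        (((pre ++ [r]).length : Int) + (rs.length : Int)) := by simp; ring
    have h3 : pre ++ r :: rs = (pre ++ [r]) ++ rs := by simp
    rw [h2, h3]
    have := ih (pre ++ [r])
    rw [show (PySem.List.pyRange ((pre.length : Int) + 1)
        (((pre ++ [r]).length : Int) + (rs.length : Int)) 1) =
        (PySem.List.pyRange (((pre ++ [r]).length : Int))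
        (((pre ++ [r]).length : Int) + (rs.length : Int)) 1) from by rw [h1]]
    rw [this]
    simp only [Option.getD_some, pvEnum]
    rw [h1]

theorem pvRowRooks_map_fst (row : List String) (i : Int) (js : List Int) :
    (pvRowRooks row i js).map Prod.fst = List.replicate (pvK js row) i := by
  induction js with
  | nil => simp [pvRowRooks, pvK]
  | cons j js ih =>
    rw [pvRowRooks_cons]
    by_cases hc : pvCell row j = "O"
    · simp [pvK, hc, ih, List.replicate_succ]
    · simp [pvK, hc, ih]

theorem pvRowRooks_map_snd (row : List String) (i : Int) (js : List Int) :
    (pvRowRooks row i js).map Prod.snd = pvCols js row := by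
  induction js with
  | nil => simp [pvRowRooks, pvCols]
  | cons j js ih =>
    rw [pvRowRooks_cons]
    by_cases hc : pvCell row j = "O"
    · simp [pvCols, hc, ih]
    · simp [pvCols, hc, ih]

theorem pvEnum_fst_ge (js : List Int) :
    ∀ (rows : List (List String)) (i0 : Int) (p : Int × Int), p ∈ pvEnum js rows i0 → i0 ≤ p.1 := by
  intro rows
  induction rows with
  | nil => intro i0 p hp; simp [pvEnum] at hp
  | cons r rs ih =>
    intro i0 p hp
    simp only [pvEnum, List.mem_append] at hp
    rcases hp with hp | hp
    · simp only [pvRowRooks, List.mem_filterMap] at hp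
      obtain ⟨j, -, hj⟩ := hp
      split at hj
      · cases hj; simp
      · cases hj
    · have := ih (i0 + 1) p hp; omega

-- row side: Nodup of the first components ↔ every row has at most one rook
theorem pvEnum_fst_nodup (js : List Int) :
    ∀ (rows : List (List String)) (i0 : Int),
    ((pvEnum js rows i0).map Prod.fst).Nodup ↔ ∀ row ∈ rows, pvK js row ≤ 1 := by
  intro rows
  induction rows with
  | nil => intro i0; simp [pvEnum]
  | cons r rs ih =>
    intro i0
    simp only [pvEnum, List.map_append, List.nodup_append, pvRowRooks_map_fst]
    constructor
    · rintro ⟨h1, h2, -⟩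
      intro row hrow
      rcases hrow with _ | hrow
      · exact (List.nodup_replicate.mp h1)
      · exact (ih (i0 + 1)).mp h2 row (by assumption)
    · intro h
      refine ⟨List.nodup_replicate.mpr (h r (by simp)), (ih (i0 + 1)).mpr
        (fun row hrow => h row (by simp [hrow])), ?_⟩
      intro a ha b hbm
      have ha' : a = i0 := List.eq_of_mem_replicate ha
      have hb' : i0 + 1 ≤ b := by
        rw [List.mem_map] at hbm
        obtain ⟨p, hp, hpb⟩ := hbm
        have := pvEnum_fst_ge js rs (i0 + 1) p hp
        omega
      omega

theorem pvEnum_map_snd (js : List Int) :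
    ∀ (rows : List (List String)) (i0 : Int),
    (pvEnum js rows i0).map Prod.snd = rows.flatMap (pvCols js) := by
  intro rows
  induction rows with
  | nil => intro i0; simp [pvEnum]
  | cons r rs ih => intro i0; simp [pvEnum, pvRowRooks_map_snd, ih]

theorem pvEnum_length (js : List Int) :
    ∀ (rows : List (List String)) (i0 : Int),
    (pvEnum js rows i0).length = (rows.map (pvK js)).sum := by
  intro rows
  induction rows with
  | nil => intro i0; simp [pvEnum]
  | cons r rs ih =>
    intro i0
    simp only [pvEnum, List.length_append, List.map_cons, List.sum_cons, ih]
    congr 1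
    simp only [pvRowRooks, pvK, List.length_filterMap_eq_countP, List.countP_eq_length_filter]
    congr 1
    apply List.filter_congr
    intro j _
    by_cases hc : pvCell r j = "O"
    · simp [hc]
    · simp [hc]

-- B's sliced row count equals pvK over the index range
theorem pvCount_take (row : List String) :
    ∀ (m : Nat), ((row.take m).count "O") = (List.range m).countP (fun k => row.getD k "" == "O") := by
  induction row with
  | nil =>
    intro m
    simp only [List.take_nil, List.count_nil]
    symm
    rw [List.countP_eq_zero]
    intro k _; simp [List.getD]
  | cons x xs ih =>
    intro m
    cases m with
    | zero => simp
    | succ m' =>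
      rw [List.range_succ_eq_map]
      simp only [List.take_succ_cons, List.countP_cons, List.countP_map]
      rw [List.count_cons]
      have : (List.range m').countP ((fun k => (x :: xs).getD k "" == "O") ∘ Nat.succ) =
          (List.range m').countP (fun k => xs.getD k "" == "O") := by
        apply List.countP_congr
        intro k _; simp
      rw [this, ← ih m']
      simp only [List.getD_cons_zero]

theorem pvK_count (row : List String) (m : Nat) :
    PySem.List.count (PySem.List.slice row none (some (m : Int))) "O" =
      pvK (PySem.List.pyRange 0 (m : Int) 1) row := by
  rw [PySem.List.count_eq, PySem.List.slice_to_natCast, pvCount_take]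
  unfold pvK
  rw [PySem.List.pyRange_one 0 (m : Int)]
  simp only [List.countP_eq_length_filter, List.filter_map, List.length_map]
  have hm : ((m : Int) - 0).toNat = m := by omega
  rw [hm]
  apply congrArg
  apply List.filter_congr
  intro k _
  simp [Function.comp, pvCell, PySem.List.pyGet?_natCast, List.getD]

theorem pvSum_cast (k : List String → Nat) (rows : List (List String)) :
    (rows.map (fun r => ((k r : Nat) : Int))).sum = (((rows.map k).sum : Nat) : Int) := by
  induction rows with
  | nil => simp
  | cons r rs ih => simp only [List.map_cons, List.sum_cons, ih]; push_cast; ring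

-- column side: Nodup of the second components ↔ every column count ≤ 1
theorem pvCount_flatMap (rows : List (List String)) (f : List String → List Int) (a : Int) :
    (rows.flatMap f).count a = (rows.map (fun r => (f r).count a)).sum := by
  induction rows with
  | nil => simp
  | cons r rs ih => simp [List.count_append, ih]

theorem pvCount_filter_le (js : List Int) (hjs : js.Nodup) (p : Int → Bool) (a : Int) :
    (js.filter p).count a = if a ∈ js ∧ p a then 1 else 0 := by
  by_cases hp : p a
  · by_cases hm : a ∈ js
    · rw [if_pos ⟨hm, hp⟩]
      have h1 : (js.filter p).count a ≤ 1 := by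
        have := List.Nodup.filter p hjs
        exact List.nodup_iff_count_le_one.mp this a
      have h2 : 1 ≤ (js.filter p).count a := by
        rw [Nat.one_le_iff_ne_zero, Ne, List.count_eq_zero]
        simp [List.mem_filter, hm, hp]
      omega
    · rw [if_neg (fun hc => hm hc.1), List.count_eq_zero]
      intro hmem
      exact hm (List.mem_of_mem_filter hmem)
  · rw [if_neg (fun hc => hp hc.2), List.count_eq_zero]
    intro hmem
    exact hp (List.mem_filter.mp hmem).2

theorem pvSnd_nodup (js : List Int) (hjs : js.Nodup) (rows : List (List String)) :
    (rows.flatMap (pvCols js)).Nodup ↔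
      ∀ j ∈ js, (rows.map (fun r => if pvCell r j = "O" then (1 : Int) else 0)).sum ≤ 1 := by
  have key : ∀ (a : Int), a ∈ js →
      ((rows.flatMap (pvCols js)).count a : Int) =
        (rows.map (fun r => if pvCell r a = "O" then (1 : Int) else 0)).sum := by
    intro a ha
    rw [pvCount_flatMap]
    induction rows with
    | nil => simp
    | cons r rs ih =>
      simp only [List.map_cons, List.sum_cons]
      push_cast [ih]
      congr 1
      unfold pvCols
      rw [pvCount_filter_le js hjs]
      by_cases hc : pvCell r a = "O" <;> simp [hc, ha]
  constructor
  · intro hnd j hj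
    rw [← key j hj]
    exact_mod_cast List.nodup_iff_count_le_one.mp hnd j
  · intro h
    rw [List.nodup_iff_count_le_one]
    intro a
    by_cases ha : a ∈ js
    · have := h a ha
      rw [← key a ha] at this
      exact_mod_cast this
    · rw [Nat.le_one_iff_eq_zero_or_eq_one]
      left
      rw [List.count_eq_zero]
      intro hmem
      rw [List.mem_flatMap] at hmem
      obtain ⟨r, -, hr⟩ := hmem
      exact ha (List.mem_of_mem_filter hr)

-- ===== VERDICT (by name: the statement is the Claim_ definition above) =====
theorem check_spec : Claim_equal_check := by
  intro board _ _
  unfold Spec_check check check_alt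
  have hcols : (if board = [] then (0 : Int) else (((PySem.List.pyGet? board 0).getD []).length : Int))
      = ((board.headD []).length : Int) := by
    cases board with
    | nil => simp
    | cons r rs => simp [PySem.List.pyGet?, PySem.List.pyIdx?]
  set m : Nat := (board.headD []).length with hm
  set js : List Int := PySem.List.pyRange 0 (m : Int) 1 with hjs
  have hjsnd : js.Nodup := PySem.List.nodup_pyRange_one 0 (m : Int)
  rw [checkOuter_process]
  have henum := pvEnum_eq js board []
  simp only [List.length_nil, Nat.cast_zero, List.nil_append, zero_add] at henum
  rw [henum]
  rw [pvProcess_char _ 0 [] [] List.nodup_nil List.nodup_nil]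
  simp only [List.nil_append, zero_add, hcols]
  simp only [pvEnum_fst_nodup js, pvEnum_map_snd js, pvEnum_length js, pvSnd_nodup js hjsnd]
  have hrc : board.map (fun row => (PySem.List.count (PySem.List.slice row none (some (m : Int))) "O" : Int))
      = board.map (fun row => ((pvK js row : Nat) : Int)) := by
    apply List.map_congr_left
    intro row _
    rw [pvK_count]
  rw [hrc]
  rw [pvSum_cast (pvK js) board]
  have hcast8 : ((((board.map (pvK js)).sum : Nat) : Int) = 8) ↔ (board.map (pvK js)).sum = 8 := by
    exact_mod_cast Iff.rfl
  have hall : (∀ c ∈ board.map (fun row => ((pvK js row : Nat) : Int)), c ≤ 1)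
      ↔ (∀ row ∈ board, pvK js row ≤ 1) := by
    simp only [List.mem_map]
    constructor
    · intro h row hrow
      have := h (pvK js row) ⟨row, hrow, rfl⟩
      exact_mod_cast this
    · rintro h c ⟨row, hrow, rfl⟩
      exact_mod_cast h row hrow
  have hcol : (∀ c ∈ js.map (fun j =>
        (board.map (fun row => if pvCell row j = "O" then (1 : Int) else 0)).sum), c ≤ 1)
      ↔ (∀ j ∈ js, (board.map (fun row => if pvCell row j = "O" then (1 : Int) else 0)).sum ≤ 1) := by
    simp only [List.mem_map]
    constructor
    · intro h j hj; exact h _ ⟨j, hj, rfl⟩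
    · rintro h c ⟨j, hj, rfl⟩; exact h j hj
  by_cases hA : (∀ row ∈ board, pvK js row ≤ 1) ∧
      (∀ j ∈ js, (board.map (fun row => if pvCell row j = "O" then (1 : Int) else 0)).sum ≤ 1)
  · rw [if_pos ⟨hA.1, hA.2⟩]
    by_cases h8 : (board.map (pvK js)).sum = 8
    · rw [if_pos (by exact_mod_cast h8)]
      rw [if_pos ⟨hcast8.mpr h8, hall.mpr hA.1, hcol.mpr hA.2⟩]
    · rw [if_neg (by exact_mod_cast h8)]
      rw [if_neg (fun hc => h8 (hcast8.mp hc.1))]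
  · rw [if_neg (fun hc => hA ⟨hc.1, hc.2⟩)]
    rw [if_neg (fun hc => hA ⟨hall.mp hc.2.1, hcol.mp hc.2.2⟩)]
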